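-- pv_equiv track=rewrite | github.com/jysim128/BMACE-MIREX | test_best.py | _merge_consecutive_chords
-- ===== SOURCE A (Python) =====
-- def _merge_consecutive_chords(chord_sequence):
--     if not chord_sequence:
--         return []
--
--     merged = []
--     current_start, current_end, current_chord = chord_sequence[0]
--
--     for start_time, end_time, chord_label in chord_sequence[1:]:
--         if chord_label == current_chord:
--             current_end = end_time
--         else:
--             merged.append((current_start, current_end, current_chord))
--             current_start, current_end, current_chord = start_time, end_time, chord_label
--
--     merged.append((current_start, current_end, current_chord))
--     return merged
-- ===== SOURCE B (Python) =====
-- def _merge_consecutive_chords(chord_sequence):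
--     # Phase 1: split into maximal runs of consecutive segments sharing a label.
--     runs = []
--     for seg in chord_sequence:
--         if runs and runs[-1][0][2] == seg[2]:
--             runs[-1].append(seg)
--         else:
--             runs.append([seg])
--     # Phase 2: emit one merged segment per run.
--     return [(run[0][0], run[-1][1], run[0][2]) for run in runs]
-- ===== Notes on version B (the rewrite author's own statement) =====
-- stated objective: alternative
-- what changed: A carries a current (start,end,label) triple and flushes it into the output inside one stateful loop; B first splits the list into maximal runs of equal-label segments and then maps each run to (first.start, last.end, label) in a comprehension.
import Mathlib
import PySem

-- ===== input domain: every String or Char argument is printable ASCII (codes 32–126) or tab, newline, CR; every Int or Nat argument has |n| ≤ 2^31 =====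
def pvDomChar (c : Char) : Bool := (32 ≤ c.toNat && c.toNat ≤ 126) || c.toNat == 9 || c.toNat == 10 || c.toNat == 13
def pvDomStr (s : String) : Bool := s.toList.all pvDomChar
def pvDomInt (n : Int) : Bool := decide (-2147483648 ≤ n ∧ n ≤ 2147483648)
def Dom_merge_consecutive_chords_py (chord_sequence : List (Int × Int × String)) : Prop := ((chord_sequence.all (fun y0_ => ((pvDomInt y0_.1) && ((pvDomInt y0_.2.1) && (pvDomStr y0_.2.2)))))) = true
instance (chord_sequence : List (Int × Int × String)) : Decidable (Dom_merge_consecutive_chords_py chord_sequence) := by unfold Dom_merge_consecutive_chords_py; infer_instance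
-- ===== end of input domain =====

-- B replaces A's single stateful flush-loop by a two-phase run-splitting scan then a map; same O(n) cost (objective: alternative decomposition).

-- ===== PORT A =====
-- loop body of A's for-loop: state = (merged, current_start, current_end, current_chord)
def aStep (st : List (Int × Int × String) × Int × Int × String) (seg : Int × Int × String) :
    List (Int × Int × String) × Int × Int × String :=
  match st, seg with
  | (merged, cs, ce, cc), (s, e, l) =>
    if l == cc then (merged, cs, e, cc)
    else (merged ++ [(cs, ce, cc)], s, e, l)

def merge_consecutive_chords_py (chord_sequence : List (Int × Int × String)) : List (Int × Int × String) :=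
  match chord_sequence with
  | [] => []
  | (s, e, l) :: rest =>
    match rest.foldl aStep ([], s, e, l) with
    | (merged, cs, ce, cc) => merged ++ [(cs, ce, cc)]

-- ===== PORT B =====
-- Phase 1 of Source B: split into maximal runs; the run being built is kept as head `h`
-- plus reversed tail `acc` (B's `runs[-1].append(seg)`), flushed when the label changes.
def groupAux (h : Int × Int × String) (acc : List (Int × Int × String)) :
    List (Int × Int × String) → List (List (Int × Int × String))
  | [] => [h :: acc.reverse]
  | y :: t => if y.2.2 == h.2.2 then groupAux h (y :: acc) t
              else (h :: acc.reverse) :: groupAux y [] t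

def pyGroupRuns : List (Int × Int × String) → List (List (Int × Int × String))
  | [] => []
  | x :: xs => groupAux x [] xs

-- Phase 2 of Source B: (run[0][0], run[-1][1], run[0][2]); runs are nonempty so defaults are unreachable
def emitGroup (g : List (Int × Int × String)) : Int × Int × String :=
  ((g.headD (0, 0, "")).1, (g.getLastD (0, 0, "")).2.1, (g.headD (0, 0, "")).2.2)

def merge_consecutive_chords_py_alt (chord_sequence : List (Int × Int × String)) : List (Int × Int × String) :=
  (pyGroupRuns chord_sequence).map emitGroup

-- ===== PRECONDITION & SPEC =====
def Spec_merge_consecutive_chords_py (chord_sequence : List (Int × Int × String)) (out : List (Int × Int × String)) : Prop := out = merge_consecutive_chords_py_alt chord_sequence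
instance (chord_sequence : List (Int × Int × String)) (out : List (Int × Int × String)) : Decidable (Spec_merge_consecutive_chords_py chord_sequence out) := by unfold Spec_merge_consecutive_chords_py; infer_instance

-- ===== CLAIM (what is proved, stated in full; the proofs are below) =====
def Claim_equal_merge_consecutive_chords_py : Prop := ∀ (chord_sequence : List (Int × Int × String)), Dom_merge_consecutive_chords_py chord_sequence → Spec_merge_consecutive_chords_py chord_sequence (merge_consecutive_chords_py chord_sequence)

-- ===== LEMMAS AND PROOFS =====

-- ===== VERDICT (by name: the statement is the Claim_ definition above) =====
lemma loopLem (rest : List (Int × Int × String)) :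
    ∀ (merged : List (Int × Int × String)) (h : Int × Int × String) (acc : List (Int × Int × String)),
    (match rest.foldl aStep (merged, h.1, ((h :: acc.reverse).getLastD (0,0,"")).2.1, h.2.2) with
     | (m, a, b, c) => m ++ [(a, b, c)])
      = merged ++ (groupAux h acc rest).map emitGroup := by
  induction rest with
  | nil =>
    intro merged h acc
    simp [groupAux, emitGroup]
  | cons y t ih =>
    intro merged h acc
    by_cases hl : y.2.2 = h.2.2
    · have h1 : (h :: (y :: acc).reverse).getLastD (0,0,"") = y := by
        rw [List.reverse_cons, ← List.cons_append, List.getLastD_concat]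
      have := ih merged h (y :: acc)
      rw [h1] at this
      simpa [groupAux, aStep, hl, List.foldl_cons] using this
    · have := ih (merged ++ [(h.1, ((h :: acc.reverse).getLastD (0,0,"")).2.1, h.2.2)]) y []
      have h2 : (([] : List (Int × Int × String)).reverse) = [] := rfl
      rw [h2] at this
      have h3 : ([y].getLastD (0,0,"")) = y := by rw [List.getLastD_cons, List.getLastD_nil]
      rw [h3] at this
      simpa [groupAux, aStep, hl, List.foldl_cons, emitGroup] using this

theorem merge_consecutive_chords_py_spec : Claim_equal_merge_consecutive_chords_py := by
  intro l _
  unfold Spec_merge_consecutive_chords_py merge_consecutive_chords_py merge_consecutive_chords_py_alt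
  match l with
  | [] => simp [pyGroupRuns]
  | (s, e, lb) :: rest =>
    have := loopLem rest [] (s, e, lb) []
    simpa [pyGroupRuns] using this
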